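-- pv_equiv track=rewrite | github.com/yeojeongkim/009 | recipes.py | ingredient_mixes
-- ===== SOURCE A (Python) =====
-- def make_grocery_list(flat_recipes):
--     """
--     Given a list of flat_recipe dictionaries that map food items to quantities,
--     return a new overall 'grocery list' dictionary that maps each ingredient name
--     to the sum of its quantities across the given flat recipes.
--
--     For example,
--         make_grocery_list([{'milk':1, 'chocolate':1}, {'sugar':1, 'milk':2}])
--     should return:
--         {'milk':3, 'chocolate': 1, 'sugar': 1}
--     """
--     grocery_dict = {}
--     for recipe in flat_recipes:
--         for ingredient, quantity in recipe.items():
--             if ingredient in grocery_dict: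
--                 grocery_dict[ingredient] += quantity
--             else:
--                 grocery_dict[ingredient] = quantity
--     return grocery_dict
--
-- def ingredient_mixes(flat_recipes):
--     """
--     Given a list of lists of dictionaries, where each inner list represents all
--     the flat recipes make a certain ingredient as part of a recipe, compute all
--     combinations of the flat recipes.
--     """
--     if not flat_recipes:
--         return [{}]
--
--     final_recipe = []
--     first_flat_recipe = flat_recipes[0]
--
--     for ingredient in first_flat_recipe:
--         for item in ingredient_mixes(flat_recipes[1:]):
--             final_recipe.append(make_grocery_list([ingredient, item]))
--
--     return final_recipe
-- ===== SOURCE B (Python) =====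
-- def merge(g, d):
--     out = dict(g)
--     for k, v in d.items():
--         out[k] = out.get(k, 0) + v
--     return out
--
-- def ingredient_mixes(flat_recipes):
--     combos = [{}]
--     for recipes in flat_recipes:
--         combos = [merge(g, d) for g in combos for d in recipes]
--     return combos
-- ===== Notes on version B (the rewrite author's own statement) =====
-- stated objective: alternative
-- what changed: Replaces the recursion on flat_recipes[1:] (which rebuilds the tail's product once per dict of the head list) by a single forward fold that grows the list of merged grocery dicts one ingredient-slot at a time, merging each partial dict with each candidate via a get/overwrite accumulation instead of make_grocery_list's membership branch.
import Mathlib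
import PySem

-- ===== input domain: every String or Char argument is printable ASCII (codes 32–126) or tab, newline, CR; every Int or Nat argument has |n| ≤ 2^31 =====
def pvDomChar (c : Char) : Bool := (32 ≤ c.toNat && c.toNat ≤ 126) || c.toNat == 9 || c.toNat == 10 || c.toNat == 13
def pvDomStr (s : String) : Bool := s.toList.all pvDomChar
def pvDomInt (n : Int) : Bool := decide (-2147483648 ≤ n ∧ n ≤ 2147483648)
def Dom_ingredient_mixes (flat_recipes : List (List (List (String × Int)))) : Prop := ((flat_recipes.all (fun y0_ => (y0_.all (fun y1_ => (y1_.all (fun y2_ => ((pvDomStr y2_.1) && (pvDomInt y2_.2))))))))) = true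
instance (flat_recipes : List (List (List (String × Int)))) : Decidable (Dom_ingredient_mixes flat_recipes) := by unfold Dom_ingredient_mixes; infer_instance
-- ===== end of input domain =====

-- B replaces A's recursion on the tail (which redoes the tail's product per head dict)
-- by one forward fold growing the list of partially merged grocery dicts; equal return values proved.

-- ===== PORT A =====
-- dicts travel as their items lists (List (String × Int)); the loop accumulator is a PySem.Dict
def make_grocery_list (flat_recipes : List (List (String × Int))) : List (String × Int) :=
  (flat_recipes.foldl (fun g recipe =>
      recipe.foldl (fun g p =>
        if g.contains p.1 then g.modify p.1 0 (· + p.2) else g.insert p.1 p.2) g)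
    (PySem.Dict.mk [])).items

def ingredient_mixes : List (List (List (String × Int))) → List (List (String × Int))
  | [] => [[]]
  | first :: rest =>
    first.foldl (fun acc ingredient =>
      (ingredient_mixes rest).foldl (fun acc2 item =>
        acc2 ++ [make_grocery_list [ingredient, item]]) acc) []

-- ===== PORT B =====
def pvMerge (g : List (String × Int)) (d : List (String × Int)) : List (String × Int) :=
  (d.foldl (fun out p => out.insert p.1 (out.getD p.1 0 + p.2)) (PySem.Dict.mk g)).items

def ingredient_mixes_alt (flat_recipes : List (List (List (String × Int)))) : List (List (String × Int)) :=
  flat_recipes.foldl (fun combos recipes => combos.flatMap (fun g => recipes.map (fun d => pvMerge g d))) [[]]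

-- ===== PRECONDITION & SPEC =====
def Spec_ingredient_mixes (flat_recipes : List (List (List (String × Int)))) (out : List (List (String × Int))) : Prop := out = ingredient_mixes_alt flat_recipes
instance (flat_recipes : List (List (List (String × Int)))) (out : List (List (String × Int))) : Decidable (Spec_ingredient_mixes flat_recipes out) := by unfold Spec_ingredient_mixes; infer_instance

-- ===== CLAIM (what is proved, stated in full; the proofs are below) =====
def Claim_equal_ingredient_mixes : Prop := ∀ (flat_recipes : List (List (List (String × Int)))), Dom_ingredient_mixes flat_recipes → Spec_ingredient_mixes flat_recipes (ingredient_mixes flat_recipes)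

-- ===== LEMMAS AND PROOFS =====

-- add all entries of a list into a dict, bumping values (the merge step both programs share)
def pvAddAll (X : PySem.Dict String Int) (l : List (String × Int)) : PySem.Dict String Int :=
  l.foldl (fun g p => g.insert p.1 (g.getD p.1 0 + p.2)) X

theorem pvAdd1_eq (g : PySem.Dict String Int) (p : String × Int) :
    (if g.contains p.1 then g.modify p.1 0 (· + p.2) else g.insert p.1 p.2)
      = g.insert p.1 (g.getD p.1 0 + p.2) := by
  by_cases h : g.contains p.1
  · simp [h, PySem.Dict.modify]
  · have h' : g.contains p.1 = false := by simpa using h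
    rw [if_neg (by simp [h']), PySem.Dict.getD_of_not_contains g 0 h', zero_add]

theorem mgl_eq (rs : List (List (String × Int))) :
    make_grocery_list rs = (rs.foldl pvAddAll (PySem.Dict.mk [])).items := by
  unfold make_grocery_list pvAddAll
  simp only [pvAdd1_eq]

theorem pvMerge_eq (g d : List (String × Int)) :
    pvMerge g d = (pvAddAll (PySem.Dict.mk g) d).items := rfl

theorem nodup_addAll (X : PySem.Dict String Int) (l : List (String × Int))
    (h : X.keys.Nodup) : (pvAddAll X l).keys.Nodup :=
  PySem.Dict.nodup_keys_foldl_insert_key l Prod.fst (fun g p => g.getD p.1 0 + p.2) X h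

-- inserts at distinct keys commute when the first key is already present
theorem insert_comm_of_contains (Y : PySem.Dict String Int) {k k' : String} (a b : Int)
    (hne : k ≠ k') (hc : Y.contains k = true) :
    (Y.insert k a).insert k' b = (Y.insert k' b).insert k a := by
  apply PySem.Dict.ext
  by_cases h' : Y.contains k' = true
  · rw [PySem.Dict.items_insert_of_contains _ b (by simp [PySem.Dict.contains_insert, h']),
        PySem.Dict.items_insert_of_contains _ a hc,
        PySem.Dict.items_insert_of_contains _ a (by simp [PySem.Dict.contains_insert, hc]),
        PySem.Dict.items_insert_of_contains _ b h', List.map_map, List.map_map]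
    apply List.map_congr_left
    intro p _
    by_cases hk : p.1 = k <;> by_cases hk' : p.1 = k' <;>
      simp_all [Function.comp, Ne.symm hne]
  · have h'' : Y.contains k' = false := by simpa using h'
    rw [PySem.Dict.items_insert_of_not_contains _ b (by simp [PySem.Dict.contains_insert, h'', Ne.symm hne]),
        PySem.Dict.items_insert_of_contains _ a hc,
        PySem.Dict.items_insert_of_contains _ a (by simp [PySem.Dict.contains_insert, hc]),
        PySem.Dict.items_insert_of_not_contains _ b h'', List.map_append]
    simp [Ne.symm hne]

-- bumping a key already present commutes with adding a list of entries afterwards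
theorem addAll_bump_comm (suf : List (String × Int)) :
    ∀ (Y : PySem.Dict String Int) (k : String) (v : Int), Y.contains k = true →
    pvAddAll (Y.insert k (Y.getD k 0 + v)) suf
      = (pvAddAll Y suf).insert k ((pvAddAll Y suf).getD k 0 + v) := by
  induction suf with
  | nil => intro Y k v _; rfl
  | cons p suf ih =>
    intro Y k v hc
    show pvAddAll ((Y.insert k (Y.getD k 0 + v)).insert p.1 (((Y.insert k (Y.getD k 0 + v)).getD p.1 0) + p.2)) suf
      = (pvAddAll (Y.insert p.1 (Y.getD p.1 0 + p.2)) suf).insert k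
          ((pvAddAll (Y.insert p.1 (Y.getD p.1 0 + p.2)) suf).getD k 0 + v)
    by_cases hk : p.1 = k
    · rw [hk, PySem.Dict.getD_insert_self, PySem.Dict.insert_insert_self,
          show Y.getD k 0 + v + p.2 = (Y.insert k (Y.getD k 0 + p.2)).getD k 0 + v from by
            rw [PySem.Dict.getD_insert_self]; ring,
          ← PySem.Dict.insert_insert_self Y k (Y.getD k 0 + p.2)]
      exact ih _ k v (PySem.Dict.contains_insert_self Y k _)
    · rw [PySem.Dict.getD_insert_of_ne _ _ _ hk,
          insert_comm_of_contains Y _ _ (fun h => hk h.symm) hc]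
      have hc' : (Y.insert p.1 (Y.getD p.1 0 + p.2)).contains k = true := by
        simp [PySem.Dict.contains_insert, hc]
      have h2 := ih (Y.insert p.1 (Y.getD p.1 0 + p.2)) k v hc'
      rw [PySem.Dict.getD_insert_of_ne _ _ _ (fun h => hk h.symm)] at h2
      exact h2

-- adding the items of (Z bumped at k) equals adding Z's items then bumping, for nodup Z
theorem addAll_items_bump (X Z : PySem.Dict String Int) (k : String) (v : Int)
    (hZ : Z.keys.Nodup) :
    pvAddAll X (Z.insert k (Z.getD k 0 + v)).items
      = (pvAddAll X Z.items).insert k ((pvAddAll X Z.items).getD k 0 + v) := by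
  by_cases hc : Z.contains k = true
  · -- decompose Z.items around the unique entry with key k
    have hkmem : k ∈ Z.keys := (PySem.Dict.contains_iff_mem_keys Z k).mp hc
    have hex : ∃ w, (k, w) ∈ Z.items := by
      simp only [PySem.Dict.keys, List.mem_map] at hkmem
      obtain ⟨p, hp, hpk⟩ := hkmem
      exact ⟨p.2, by rwa [← hpk, Prod.mk.eta]⟩
    obtain ⟨w, hw⟩ := hex
    obtain ⟨pre, suf, hsplit⟩ := List.append_of_mem hw
    have hwval : Z.getD k 0 = w := PySem.Dict.getD_of_mem_items Z hw hZ 0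
    have hnd : (pre.map Prod.fst ++ k :: suf.map Prod.fst).Nodup := by
      have := hZ
      rw [show Z.keys = Z.items.map Prod.fst from rfl, hsplit, List.map_append, List.map_cons] at this
      exact this
    have hpre : ∀ p ∈ pre, p.1 ≠ k := by
      intro p hp h
      have hk1 : k ∈ pre.map Prod.fst := h ▸ List.mem_map_of_mem hp
      have := (List.nodup_append.mp hnd).2.2
      exact this k hk1 k (List.mem_cons_self) rfl
    have hsuf : ∀ p ∈ suf, p.1 ≠ k := by
      intro p hp h
      have hk1 : k ∈ suf.map Prod.fst := h ▸ List.mem_map_of_mem hp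
      have := (List.nodup_append.mp hnd).2.1
      exact (List.nodup_cons.mp this).1 hk1
    have hitems : (Z.insert k (Z.getD k 0 + v)).items = pre ++ (k, w + v) :: suf := by
      rw [PySem.Dict.items_insert_of_contains _ _ hc, hsplit, List.map_append, List.map_cons]
      have hid : ∀ (l : List (String × Int)), (∀ p ∈ l, p.1 ≠ k) →
          l.map (fun p => if (p.1 == k) = true then (k, Z.getD k 0 + v) else p) = l := by
        intro l hl
        apply (List.map_congr_left ?_).trans (List.map_id _)
        intro p hp; simp [hl p hp]
      rw [hid pre hpre, hid suf hsuf]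
      simp [hwval]
    rw [hitems, hsplit]
    show pvAddAll X (pre ++ (k, w + v) :: suf) = _
    unfold pvAddAll
    rw [List.foldl_append, List.foldl_append, List.foldl_cons, List.foldl_cons]
    set Y := List.foldl (fun g p => g.insert p.1 (g.getD p.1 0 + p.2)) X pre with hY
    show pvAddAll (Y.insert k (Y.getD k 0 + (w + v))) suf
      = (pvAddAll (Y.insert k (Y.getD k 0 + w)) suf).insert k
          ((pvAddAll (Y.insert k (Y.getD k 0 + w)) suf).getD k 0 + v)
    rw [show Y.getD k 0 + (w + v) = (Y.insert k (Y.getD k 0 + w)).getD k 0 + v from by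
          rw [PySem.Dict.getD_insert_self]; ring,
        ← PySem.Dict.insert_insert_self Y k (Y.getD k 0 + w)]
    exact addAll_bump_comm suf _ k v (PySem.Dict.contains_insert_self Y k _)
  · have hc' : Z.contains k = false := by simpa using hc
    rw [PySem.Dict.getD_of_not_contains Z 0 hc',
        PySem.Dict.items_insert_of_not_contains Z _ hc']
    unfold pvAddAll
    rw [List.foldl_append]
    simp

-- master lemma: adding a merged dict's items = adding the raw entry lists in sequence
theorem addAll_items (ys : List (String × Int)) :
    ∀ (X Z : PySem.Dict String Int), Z.keys.Nodup →
    pvAddAll X (pvAddAll Z ys).items = pvAddAll (pvAddAll X Z.items) ys := by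
  induction ys with
  | nil => intro X Z _; rfl
  | cons y ys ih =>
    intro X Z hZ
    show pvAddAll X (pvAddAll (Z.insert y.1 (Z.getD y.1 0 + y.2)) ys).items = _
    have hnd : (Z.insert y.1 (Z.getD y.1 0 + y.2)).keys.Nodup := nodup_addAll Z [y] hZ
    rw [ih X _ hnd, addAll_items_bump X Z y.1 y.2 hZ]
    rfl

-- the pointwise bridge: merging A's pair-merge result equals merging the two dicts in turn
theorem pvMerge_mgl (g a b : List (String × Int)) :
    pvMerge g (make_grocery_list [a, b]) = pvMerge (pvMerge g a) b := by
  rw [mgl_eq, pvMerge_eq, pvMerge_eq, pvMerge_eq]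
  show (pvAddAll (PySem.Dict.mk g) (pvAddAll (pvAddAll (PySem.Dict.mk []) a) b).items).items
      = (pvAddAll (PySem.Dict.mk ((pvAddAll (PySem.Dict.mk g) a).items)) b).items
  have hnil : (PySem.Dict.mk ([] : List (String × Int))).keys.Nodup := List.nodup_nil
  rw [addAll_items b _ _ (nodup_addAll _ a hnil), addAll_items a _ _ hnil]
  rfl

-- A's pair-merge with the empty dict on the left is B's two-step merge from []
theorem mgl_pair (a b : List (String × Int)) :
    make_grocery_list [a, b] = pvMerge (pvMerge [] a) b := by
  rw [mgl_eq]; rfl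

-- characterization of A as a flatMap
theorem A_cons (f : List (List (String × Int))) (rest : List (List (List (String × Int)))) :
    ingredient_mixes (f :: rest)
      = f.flatMap (fun a => (ingredient_mixes rest).map (fun b => make_grocery_list [a, b])) := by
  show f.foldl _ [] = _
  simp only [PySem.List.foldl_append_singleton_eq_map, PySem.List.foldl_append_eq_flatMap]
  rw [List.nil_append]

-- the value of B's fold state as a function of the remaining slots
def pvCombos : List (List (List (String × Int))) → List (String × Int) → List (List (String × Int))
  | [], g => [g]
  | r :: rs, g => r.flatMap (fun d => pvCombos rs (pvMerge g d))

theorem B_foldl (frs : List (List (List (String × Int)))) :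
    ∀ (acc : List (List (String × Int))), frs.foldl (fun combos recipes => combos.flatMap (fun g => recipes.map (fun d => pvMerge g d))) acc
      = acc.flatMap (pvCombos frs) := by
  induction frs with
  | nil => intro acc; simp [pvCombos]
  | cons r rs ih =>
    intro acc
    rw [List.foldl_cons, ih, List.flatMap_assoc]
    apply List.flatMap_congr
    intro g _
    rw [List.flatMap_map]
    rfl

theorem C_eq (rest : List (List (List (String × Int)))) :
    ∀ g, pvCombos rest g = (ingredient_mixes rest).map (fun b => pvMerge g b) := by
  induction rest with
  | nil => intro g; show [g] = [pvMerge g []]; rfl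
  | cons r rs ih =>
    intro g
    rw [A_cons]
    show r.flatMap (fun d => pvCombos rs (pvMerge g d)) = _
    rw [List.map_flatMap]
    apply List.flatMap_congr
    intro d _
    rw [ih (pvMerge g d), List.map_map]
    apply List.map_congr_left
    intro b _
    exact (pvMerge_mgl g d b).symm

-- ===== VERDICT (by name: the statement is the Claim_ definition above) =====
theorem ingredient_mixes_spec : Claim_equal_ingredient_mixes := by
  intro frs _
  show ingredient_mixes frs = ingredient_mixes_alt frs
  unfold ingredient_mixes_alt
  rw [B_foldl]
  cases frs with
  | nil => rfl
  | cons f rest =>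
    show ingredient_mixes (f :: rest) = pvCombos (f :: rest) [] ++ []
    rw [List.append_nil, A_cons]
    show _ = f.flatMap (fun d => pvCombos rest (pvMerge [] d))
    apply List.flatMap_congr
    intro a _
    rw [C_eq rest (pvMerge [] a)]
    apply List.map_congr_left
    intro b _
    exact mgl_pair a b
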